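-- pv_equiv track=rewrite | github.com/vennucodetester/VPM-TC | advanced_excel_importer.py | find_column_matches
-- ===== SOURCE A (Python) =====
-- def find_column_matches(columns):
--     mapped = {}
--     lower_columns = {col.lower(): col for col in columns}
--     pr_terms = ['pr id', 'problem report', 'pr number']
--     ecn_terms = ['ecn id', 'ecn number']
--     item_terms = ['item id/rev', 'item id', 'item']
--     for term in pr_terms:
--         if term in lower_columns: mapped['pr'] = lower_columns[term]; break
--     for term in ecn_terms:
--         if term in lower_columns: mapped['ecn'] = lower_columns[term]; break
--     for term in item_terms:
--         if term in lower_columns: mapped['item'] = lower_columns[term]; break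
--     return mapped
-- ===== SOURCE B (Python) =====
-- _TERMS = {
--     'pr': ['pr id', 'problem report', 'pr number'],
--     'ecn': ['ecn id', 'ecn number'],
--     'item': ['item id/rev', 'item id', 'item'],
-- }
--
-- _REV = {term: (key, i)
--         for key, terms in _TERMS.items()
--         for i, term in enumerate(terms)}
--
--
-- def find_column_matches(columns):
--     best = {}
--     for col in columns:
--         hit = _REV.get(col.lower())
--         if hit is not None:
--             key, pri = hit
--             if key not in best or pri <= best[key][0]:
--                 best[key] = (pri, col)
--     return {key: best[key][1] for key in ('pr', 'ecn', 'item') if key in best}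
-- ===== Notes on version B (the rewrite author's own statement) =====
-- stated objective: alternative
-- what changed: Replaces the lowercase-column dict plus three per-category term scans by a precomputed reverse term->(category,priority) table and a single pass over the columns keeping the best-priority (last-wins) column per category.
import Mathlib
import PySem

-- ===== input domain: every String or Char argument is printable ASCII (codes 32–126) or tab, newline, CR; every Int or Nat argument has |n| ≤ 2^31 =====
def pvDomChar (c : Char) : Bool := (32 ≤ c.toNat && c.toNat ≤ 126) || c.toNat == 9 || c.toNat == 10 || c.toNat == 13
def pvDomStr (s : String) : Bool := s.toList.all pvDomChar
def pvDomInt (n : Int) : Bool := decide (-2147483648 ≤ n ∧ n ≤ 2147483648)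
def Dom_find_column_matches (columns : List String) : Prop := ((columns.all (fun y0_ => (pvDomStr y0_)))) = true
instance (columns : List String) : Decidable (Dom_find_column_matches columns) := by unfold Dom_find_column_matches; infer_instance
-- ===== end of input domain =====

-- B replaces A's lowercase-column dict plus three per-category term scans by a precomputed
-- reverse term->(category,priority) table and a single pass over the columns (alternative decomposition).

-- ===== PORT A =====
-- 'for term in terms: if term in lower_columns: mapped[key] = lower_columns[term]; break'
def pvFirstMatch (lower : PySem.Dict String String) (mapped : PySem.Dict String String)
    (key : String) : List String → PySem.Dict String String
  | [] => mapped
  | t :: rest =>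
    match lower.get? t with
    | some v => mapped.insert key v
    | none => pvFirstMatch lower mapped key rest

def find_column_matches (columns : List String) : List (String × String) :=
  let lower_columns := columns.foldl (fun d col => d.insert (PySem.Str.lower col) col) PySem.Dict.empty
  let mapped : PySem.Dict String String := PySem.Dict.empty
  let mapped := pvFirstMatch lower_columns mapped "pr" ["pr id", "problem report", "pr number"]
  let mapped := pvFirstMatch lower_columns mapped "ecn" ["ecn id", "ecn number"]
  let mapped := pvFirstMatch lower_columns mapped "item" ["item id/rev", "item id", "item"]
  mapped.items

-- ===== PORT B =====
def pvTermTable : List (String × List String) :=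
  [("pr", ["pr id", "problem report", "pr number"]),
   ("ecn", ["ecn id", "ecn number"]),
   ("item", ["item id/rev", "item id", "item"])]

-- _REV = {term: (key, i) for key, terms in _TERMS.items() for i, term in enumerate(terms)}
def pvRev : PySem.Dict String (String × Int) :=
  pvTermTable.foldl
    (fun d kv => (PySem.List.enumerate kv.2).foldl (fun d it => d.insert it.2 (kv.1, it.1)) d)
    PySem.Dict.empty

def pvStepB (best : PySem.Dict String (Int × String)) (col : String) : PySem.Dict String (Int × String) :=
  match pvRev.get? (PySem.Str.lower col) with
  | none => best
  | some (key, pri) =>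
    match best.get? key with
    | none => best.insert key (pri, col)
    | some bp => if pri ≤ bp.1 then best.insert key (pri, col) else best

def find_column_matches_alt (columns : List String) : List (String × String) :=
  let best := columns.foldl pvStepB PySem.Dict.empty
  (["pr", "ecn", "item"] : List String).foldl
    (fun acc key =>
      match best.get? key with
      | some pc => acc ++ [(key, pc.2)]
      | none => acc) []

-- ===== PRECONDITION & SPEC =====
def Spec_find_column_matches (columns : List String) (out : List (String × String)) : Prop := out = find_column_matches_alt columns
instance (columns : List String) (out : List (String × String)) : Decidable (Spec_find_column_matches columns out) := by unfold Spec_find_column_matches; infer_instance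

-- ===== CLAIM (what is proved, stated in full; the proofs are below) =====
def Claim_equal_find_column_matches : Prop := ∀ (columns : List String), Dom_find_column_matches columns → Spec_find_column_matches columns (find_column_matches columns)

-- ===== LEMMAS AND PROOFS =====

-- the first term (with its index) that occurs as a key of `lower`, together with its column
def pvHit (lower : PySem.Dict String String) : List String → Int → Option (Int × String)
  | [], _ => none
  | t :: rest, i =>
    match lower.get? t with
    | some v => some (i, v)
    | none => pvHit lower rest (i + 1)

theorem pvFirstMatch_eq (lower mapped : PySem.Dict String String) (key : String)
    (terms : List String) (i : Int) :
    pvFirstMatch lower mapped key terms =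
      (match pvHit lower terms i with
       | some p => mapped.insert key p.2
       | none => mapped) := by
  induction terms generalizing i with
  | nil => rfl
  | cons t rest ih =>
    simp only [pvFirstMatch, pvHit]
    cases lower.get? t with
    | none => exact ih (i + 1)
    | some v => rfl

theorem pvStep_inv (lower : PySem.Dict String String) (best : PySem.Dict String (Int × String)) (col : String)
    (h1 : best.get? "pr" = pvHit lower ["pr id", "problem report", "pr number"] 0)
    (h2 : best.get? "ecn" = pvHit lower ["ecn id", "ecn number"] 0)
    (h3 : best.get? "item" = pvHit lower ["item id/rev", "item id", "item"] 0) :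
    (pvStepB best col).get? "pr" = pvHit (lower.insert (PySem.Str.lower col) col) ["pr id", "problem report", "pr number"] 0 ∧
    (pvStepB best col).get? "ecn" = pvHit (lower.insert (PySem.Str.lower col) col) ["ecn id", "ecn number"] 0 ∧
    (pvStepB best col).get? "item" = pvHit (lower.insert (PySem.Str.lower col) col) ["item id/rev", "item id", "item"] 0 := by
  by_cases e1 : PySem.Str.lower col = "pr id"
  · rcases q1 : lower.get? "pr id" with _|v <;> rcases q2 : lower.get? "problem report" with _|w <;> rcases q3 : lower.get? "pr number" with _|u <;>
      simp_all [pvStepB, pvHit, PySem.Dict.get?_insert, show pvRev.get? "pr id" = some ("pr", 0) from rfl]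
  by_cases e2 : PySem.Str.lower col = "problem report"
  · rcases q1 : lower.get? "pr id" with _|v <;> rcases q2 : lower.get? "problem report" with _|w <;> rcases q3 : lower.get? "pr number" with _|u <;>
      simp_all [pvStepB, pvHit, PySem.Dict.get?_insert, show pvRev.get? "problem report" = some ("pr", 1) from rfl]
  by_cases e3 : PySem.Str.lower col = "pr number"
  · rcases q1 : lower.get? "pr id" with _|v <;> rcases q2 : lower.get? "problem report" with _|w <;> rcases q3 : lower.get? "pr number" with _|u <;>
      simp_all [pvStepB, pvHit, PySem.Dict.get?_insert, show pvRev.get? "pr number" = some ("pr", 2) from rfl]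
  by_cases e4 : PySem.Str.lower col = "ecn id"
  · rcases q1 : lower.get? "ecn id" with _|v <;> rcases q2 : lower.get? "ecn number" with _|w <;>
      simp_all [pvStepB, pvHit, PySem.Dict.get?_insert, show pvRev.get? "ecn id" = some ("ecn", 0) from rfl]
  by_cases e5 : PySem.Str.lower col = "ecn number"
  · rcases q1 : lower.get? "ecn id" with _|v <;> rcases q2 : lower.get? "ecn number" with _|w <;>
      simp_all [pvStepB, pvHit, PySem.Dict.get?_insert, show pvRev.get? "ecn number" = some ("ecn", 1) from rfl]
  by_cases e6 : PySem.Str.lower col = "item id/rev"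
  · rcases q1 : lower.get? "item id/rev" with _|v <;> rcases q2 : lower.get? "item id" with _|w <;> rcases q3 : lower.get? "item" with _|u <;>
      simp_all [pvStepB, pvHit, PySem.Dict.get?_insert, show pvRev.get? "item id/rev" = some ("item", 0) from rfl]
  by_cases e7 : PySem.Str.lower col = "item id"
  · rcases q1 : lower.get? "item id/rev" with _|v <;> rcases q2 : lower.get? "item id" with _|w <;> rcases q3 : lower.get? "item" with _|u <;>
      simp_all [pvStepB, pvHit, PySem.Dict.get?_insert, show pvRev.get? "item id" = some ("item", 1) from rfl]
  by_cases e8 : PySem.Str.lower col = "item"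
  · rcases q1 : lower.get? "item id/rev" with _|v <;> rcases q2 : lower.get? "item id" with _|w <;> rcases q3 : lower.get? "item" with _|u <;>
      simp_all [pvStepB, pvHit, PySem.Dict.get?_insert, show pvRev.get? "item" = some ("item", 2) from rfl]
  · have f1 : ¬("pr id" = PySem.Str.lower col) := fun h => e1 h.symm
    have f2 : ¬("problem report" = PySem.Str.lower col) := fun h => e2 h.symm
    have f3 : ¬("pr number" = PySem.Str.lower col) := fun h => e3 h.symm
    have f4 : ¬("ecn id" = PySem.Str.lower col) := fun h => e4 h.symm
    have f5 : ¬("ecn number" = PySem.Str.lower col) := fun h => e5 h.symm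
    have f6 : ¬("item id/rev" = PySem.Str.lower col) := fun h => e6 h.symm
    have f7 : ¬("item id" = PySem.Str.lower col) := fun h => e7 h.symm
    have f8 : ¬("item" = PySem.Str.lower col) := fun h => e8 h.symm
    have hrev : pvRev.get? (PySem.Str.lower col) = none := by
      rw [show pvRev = PySem.Dict.mk [("pr id", ("pr", 0)), ("problem report", ("pr", 1)), ("pr number", ("pr", 2)),
            ("ecn id", ("ecn", 0)), ("ecn number", ("ecn", 1)),
            ("item id/rev", ("item", 0)), ("item id", ("item", 1)), ("item", ("item", 2))] from rfl]
      simp [PySem.Dict.get?, f1, f2, f3, f4, f5, f6, f7, f8]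
    refine ⟨?_, ?_, ?_⟩ <;>
      simp [pvStepB, hrev, pvHit, PySem.Dict.get?_insert, f1, f2, f3, f4, f5, f6, f7, f8, h1, h2, h3]

theorem pvFold_inv (cols : List String) (lower : PySem.Dict String String) (best : PySem.Dict String (Int × String))
    (h1 : best.get? "pr" = pvHit lower ["pr id", "problem report", "pr number"] 0)
    (h2 : best.get? "ecn" = pvHit lower ["ecn id", "ecn number"] 0)
    (h3 : best.get? "item" = pvHit lower ["item id/rev", "item id", "item"] 0) :
    (cols.foldl pvStepB best).get? "pr" = pvHit (cols.foldl (fun d col => d.insert (PySem.Str.lower col) col) lower) ["pr id", "problem report", "pr number"] 0 ∧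
    (cols.foldl pvStepB best).get? "ecn" = pvHit (cols.foldl (fun d col => d.insert (PySem.Str.lower col) col) lower) ["ecn id", "ecn number"] 0 ∧
    (cols.foldl pvStepB best).get? "item" = pvHit (cols.foldl (fun d col => d.insert (PySem.Str.lower col) col) lower) ["item id/rev", "item id", "item"] 0 := by
  induction cols generalizing lower best with
  | nil => exact ⟨h1, h2, h3⟩
  | cons c rest ih =>
    obtain ⟨g1, g2, g3⟩ := pvStep_inv lower best c h1 h2 h3
    exact ih _ _ g1 g2 g3

-- ===== VERDICT (by name: the statement is the Claim_ definition above) =====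
theorem find_column_matches_spec : Claim_equal_find_column_matches := by
  intro columns _
  unfold Spec_find_column_matches find_column_matches find_column_matches_alt
  dsimp only
  obtain ⟨g1, g2, g3⟩ := pvFold_inv columns PySem.Dict.empty PySem.Dict.empty rfl rfl rfl
  rw [pvFirstMatch_eq _ _ _ _ 0, pvFirstMatch_eq _ _ _ _ 0, pvFirstMatch_eq _ _ _ _ 0]
  simp only [List.foldl, g1, g2, g3]
  rcases hp : pvHit (columns.foldl (fun d col => d.insert (PySem.Str.lower col) col) PySem.Dict.empty) ["pr id", "problem report", "pr number"] 0 with _ | p <;>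
  rcases he : pvHit (columns.foldl (fun d col => d.insert (PySem.Str.lower col) col) PySem.Dict.empty) ["ecn id", "ecn number"] 0 with _ | e <;>
  rcases hi : pvHit (columns.foldl (fun d col => d.insert (PySem.Str.lower col) col) PySem.Dict.empty) ["item id/rev", "item id", "item"] 0 with _ | it <;>
  rfl
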